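-- pv_equiv track=rewrite | github.com/chbpku/rpi.sessdsa | 代码/03 简易触控游戏/Led Puzzle-Get Leaststep.py | LeastStep
-- ===== SOURCE A (Python) =====
-- def getdig(n,k):
--     return (n//(2**(k-1))) % 2
--
-- def revdig(n,k):
--     if getdig(n,k) == 1:
--         return n-2**(k-1)
--     else:
--         return n+2**(k-1)
--
-- def alter(n,k):
--     n=revdig(n,k)
--     if k!=1:
--         n=revdig(n,k-1)
--     if k!=8:
--         n=revdig(n,k+1)
--     return int(n)
--
-- def LeastStep(n):
--     dis = [-1 for j in range(256)]
--     dis[n] = 0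
--     get = False
--     round = 0
--     # 广度优先搜索
--     new=False
--     while not get:
--         new=False
--         for i in range(256):
--             if dis[i] == round:
--                 for k in range(1,9):
--                     if dis[alter(i, k)] == -1:
--                         new=True
--                         dis[alter(i, k)] = round+1  # 新到达的状态标记最小距离
--         if not new:
--             return -1
--         round += 1
--         if dis[255]>0:
--             get=True  # 到达全亮状态，停止
--     return dis[255]
-- ===== SOURCE B (Python) =====
-- def getdig(n,k):
--     return (n//(2**(k-1))) % 2
--
-- def LeastStep(n):
--     # GF(2) light-chasing: presses commute and are involutions, so the minimum
--     # number of steps is the minimum weight of a press-vector x solving the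
--     # tridiagonal system x[j-1]+x[j]+x[j+1] = t[j] (mod 2); x[0] determines the
--     # rest, so only two candidate solutions exist.
--     s = n % 256
--     best = -1
--     for first in (0, 1):
--         x = [first]
--         for j in range(1, 8):
--             prev2 = x[j-2] if j >= 2 else 0
--             tj = 1 - getdig(s, j)
--             x.append((tj - x[j-1] - prev2) % 2)
--         t8 = 1 - getdig(s, 8)
--         if (x[6] + x[7]) % 2 == t8:
--             c = sum(x)
--             if best == -1 or c < best:
--                 best = c
--     return best
-- ===== Notes on version B (the rewrite author's own statement) =====
-- stated objective: alternative
-- what changed: A runs a round-based BFS over all 256 LED states, rescanning a 256-entry distance array every round; B instead solves the button-press problem algebraically: presses commute over GF(2), so the answer is the minimum weight of a press-vector solving a tridiagonal linear system, and since the first press determines all the others by light-chasing, B checks just the two candidate vectors (constant work per call, unverified in a timing run since A raises on its large generated inputs).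
-- intended difference: On n with n % 256 == 255 (n = 255 or n = -1 inside Pre_) the board is already all-lit: A returns -1 because its stop test dis[255] > 0 never fires on the distance 0, while B returns 0, the intended minimal number of presses. — e.g. on LeastStep(255): A returns -1, B returns 0
import Mathlib
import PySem

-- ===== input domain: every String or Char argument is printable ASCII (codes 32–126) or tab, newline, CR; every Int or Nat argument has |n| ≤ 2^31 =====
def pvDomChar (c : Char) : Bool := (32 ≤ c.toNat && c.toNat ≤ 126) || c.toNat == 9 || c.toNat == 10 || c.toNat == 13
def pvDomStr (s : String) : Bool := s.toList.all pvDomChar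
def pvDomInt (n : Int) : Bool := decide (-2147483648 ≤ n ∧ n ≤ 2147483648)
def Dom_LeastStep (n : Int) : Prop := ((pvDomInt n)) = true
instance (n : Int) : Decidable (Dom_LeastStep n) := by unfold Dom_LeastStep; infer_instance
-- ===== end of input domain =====

-- B replaces A's breadth-first search over the 256 LED states by GF(2) light-chasing:
-- the minimum number of presses is the minimum weight of a press-vector solving a
-- tridiagonal linear system over GF(2), and only two candidate solutions exist.

-- ===== PORT A =====
def getdigP (n k : Int) : Int :=
  PySem.Int.mod (PySem.Int.floordiv n ((2:Int) ^ (k-1).toNat)) 2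

def revdigP (n k : Int) : Int :=
  if getdigP n k == 1 then n - (2:Int) ^ (k-1).toNat else n + (2:Int) ^ (k-1).toNat

def alterP (n k : Int) : Int :=
  let n1 := revdigP n k
  let n2 := if k != 1 then revdigP n1 (k-1) else n1
  if k != 8 then revdigP n2 (k+1) else n2

-- inner 'for k in range(1,9)' body of A (state: (dis, new))
def innerA (round i : Int) (q : List Int × Bool) (k : Int) : List Int × Bool :=
  if PySem.List.pyGetD q.1 (alterP i k) 0 == -1 then
    (PySem.List.pySetD q.1 (alterP i k) (round+1), true)
  else q

-- outer 'for i in range(256)' body of A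
def outerA (round : Int) (p : List Int × Bool) (i : Int) : List Int × Bool :=
  if PySem.List.pyGetD p.1 i 0 == round then
    (PySem.List.pyRange 1 9).foldl (innerA round i) p
  else p

-- 'while not get' loop of A; fuel only bounds the recursion (the loop returns after at
-- most 10 rounds: each round either stops or moves to the next BFS layer, and no layer
-- beyond 8 exists)
def loopA : Nat → List Int → Int → Int
  | 0, _, _ => -1
  | fuel+1, dis, round =>
    let st := (PySem.List.pyRange 0 256).foldl (outerA round) (dis, false)
    if st.2 = false then -1
    else if PySem.List.pyGetD st.1 255 0 > 0 then PySem.List.pyGetD st.1 255 0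
    else loopA fuel st.1 (round+1)

def LeastStep (n : Int) : Int :=
  let dis := (PySem.List.pyRange 0 256).map (fun _ => (-1:Int))
  let dis := PySem.List.pySetD dis n 0
  loopA 300 dis 0

-- ===== PORT B =====
-- the 'for j in range(1, 8)' chasing loop of B, building the press list x
def chaseB (s first : Int) : List Int :=
  (PySem.List.pyRange 1 8).foldl (fun x j =>
    let prev2 := if j ≥ 2 then PySem.List.pyGetD x (j-2) 0 else 0
    let tj := 1 - getdigP s j
    x ++ [PySem.Int.mod (tj - PySem.List.pyGetD x (j-1) 0 - prev2) 2]) [first]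

-- body of B's 'for first in (0, 1)' loop: check the last equation, update best
def tryFirstB (s best first : Int) : Int :=
  let x := chaseB s first
  let t8 := 1 - getdigP s 8
  if PySem.Int.mod (PySem.List.pyGetD x 6 0 + PySem.List.pyGetD x 7 0) 2 == t8 then
    let c := x.foldl (· + ·) 0
    if best == -1 || c < best then c else best
  else best

def LeastStep_alt (n : Int) : Int :=
  let s := PySem.Int.mod n 256
  [(0:Int), 1].foldl (tryFirstB s) (-1)

-- ===== PRECONDITION & SPEC =====
-- A indexes a 256-entry list with n (dis[n] = 0): outside -256 ≤ n < 256 it raises IndexError.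
def Pre_LeastStep (n : Int) : Prop := -256 ≤ n ∧ n < 256
instance (n : Int) : Decidable (Pre_LeastStep n) := by unfold Pre_LeastStep; infer_instance

def pvWitness_LeastStep : Int := 0

-- On the already-all-lit state (n ≡ 255 mod 256, i.e. n = 255 or n = -1 inside Pre_) A
-- returns -1 because its stop test 'dis[255] > 0' never fires on distance 0, while B
-- returns 0, the intended minimal number of steps when no press is needed.
def D_LeastStep (n : Int) : Prop := PySem.Int.mod n 256 = 255
instance (n : Int) : Decidable (D_LeastStep n) := by unfold D_LeastStep; infer_instance

def Spec_LeastStep (n : Int) (out : Int) : Prop := ¬ D_LeastStep n → out = LeastStep_alt n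
instance (n : Int) (out : Int) : Decidable (Spec_LeastStep n out) := by unfold Spec_LeastStep; infer_instance

def pvDiffWitness_LeastStep : Int := 255
def pvDiffWitnessOut_LeastStep : Int × Int := (-1, 0)

-- ===== CLAIM (what is proved, stated in full; the proofs are below) =====
def Claim_unchanged_LeastStep : Prop := ∀ (n : Int), Dom_LeastStep n → Pre_LeastStep n → Spec_LeastStep n (LeastStep n)
def Claim_changed_LeastStep : Prop := Dom_LeastStep (pvDiffWitness_LeastStep) ∧ Pre_LeastStep (pvDiffWitness_LeastStep) ∧ D_LeastStep (pvDiffWitness_LeastStep) ∧ LeastStep (pvDiffWitness_LeastStep) = pvDiffWitnessOut_LeastStep.1 ∧ LeastStep_alt (pvDiffWitness_LeastStep) = pvDiffWitnessOut_LeastStep.2 ∧ pvDiffWitnessOut_LeastStep.1 ≠ pvDiffWitnessOut_LeastStep.2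
def Claim_exact_LeastStep : Prop := ∀ (n : Int), Dom_LeastStep n → Pre_LeastStep n → D_LeastStep n → LeastStep n ≠ LeastStep_alt n

-- ===== LEMMAS AND PROOFS =====

-- read dis[j] (indices used are always in range, default irrelevant)
def dget (dis : List Int) (j : Int) : Int := PySem.List.pyGetD dis j 0

-- frontier-neighbourhood condition of one of A's rounds, relative to a distance list
def Cnb (r : Int) (is : List Int) (dis : List Int) (j : Int) : Prop :=
  ∃ i ∈ is, dget dis i = r ∧ ∃ k ∈ PySem.List.pyRange 1 9, alterP i k = j

-- XOR masks of the 8 presses: press k (0-based) toggles bits k-1, k, k+1 (clipped to 0..7)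
def maskN (k : Nat) : Nat := [3, 7, 14, 28, 56, 112, 224, 192].getD k 0

-- minimum GF(2) weight of a press-vector whose masks XOR to y (99 = no solution),
-- tabulated; the decide-facts below are the only properties the proofs use
def tabT : List Nat := [0, 99, 99, 1, 2, 99, 99, 1, 99, 2, 3, 99, 99, 2, 1, 99, 99, 3, 2, 99, 99, 3, 4, 99, 3, 99, 99, 2, 1, 99, 99, 2, 2, 99, 99, 3, 2, 99, 99, 3, 99, 4, 3, 99, 99, 4, 3, 99, 99, 3, 4, 99, 99, 3, 2, 99, 1, 99, 99, 2, 3, 99, 99, 2, 99, 4, 5, 99, 99, 4, 3, 99, 2, 99, 99, 3, 4, 99, 99, 3, 3, 99, 99, 4, 3, 99, 99, 4, 99, 5, 4, 99, 99, 5, 4, 99, 99, 4, 3, 99, 99, 4, 5, 99, 4, 99, 99, 3, 2, 99, 99, 3, 1, 99, 99, 2, 3, 99, 99, 2, 99, 3, 4, 99, 99, 3, 2, 99, 99, 5, 4, 99, 99, 5, 4, 99, 3, 99, 99, 4, 3, 99, 99, 4, 2, 99, 99, 3, 4, 99, 99, 3, 99, 4, 5, 99, 99, 4, 3, 99, 99,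 5, 4, 99, 99, 5, 4, 99, 3, 99, 99, 4, 3, 99, 99, 4, 2, 99, 99, 3, 4, 99, 99, 3, 99, 4, 5, 99, 99, 4, 3, 99, 1, 99, 99, 2, 3, 99, 99, 2, 99, 3, 4, 99, 99, 3, 2, 99, 99, 4, 3, 99, 99, 4, 3, 99, 2, 99, 99, 3, 2, 99, 99, 3, 1, 99, 99, 2, 3, 99, 99, 2, 99, 3, 4, 99, 99, 3, 2, 99, 99, 4, 3, 99, 99, 4, 3, 99, 2, 99, 99, 3, 2, 99, 99, 3]

def Tf (y : Nat) : Nat := tabT.getD y 99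

-- distance-table entry as an Int, for start s and state j
def WtI (s j : Int) : Int := (Tf (s.toNat ^^^ j.toNat) : Int)

-- the BFS invariant: after rounds 0..r-1, dis[j] holds the true distance where it is ≤ r
def InvT (s r : Int) (dis : List Int) : Prop :=
  dis.length = 256 ∧
  ∀ j : Int, 0 ≤ j → j < 256 → dget dis j = if WtI s j ≤ r then WtI s j else -1

-- ---- decidable facts about the table ----

set_option maxRecDepth 1000000 in
theorem T_zero : ∀ y : Fin 256, (Tf y.val = 0 ↔ y.val = 0) := by decide

set_option maxRecDepth 1000000 in
theorem T_bound : ∀ y : Fin 256, Tf y.val ≤ 8 ∨ Tf y.val = 99 := by decide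

set_option maxRecDepth 1000000 in
theorem T_step : ∀ y : Fin 256, ∀ r : Fin 10, r.val < Tf y.val →
    ((Tf y.val = r.val + 1) ↔ ∃ g : Fin 8, Tf (y.val ^^^ maskN g.val) = r.val) := by decide

set_option maxRecDepth 1000000 in
theorem T_flag : ∀ r : Fin 10,
    ((∃ y : Fin 256, Tf y.val = r.val ∧ ∃ g : Fin 8, r.val < Tf (y.val ^^^ maskN g.val)) ↔
      ∃ y : Fin 256, Tf y.val = r.val + 1) := by decide

set_option maxRecDepth 1000000 in
theorem T_sat : ∀ r : Fin 10, (¬ ∃ y : Fin 256, Tf y.val = r.val + 1) →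
    ∀ y : Fin 256, (Tf y.val ≤ r.val ∨ Tf y.val = 99) := by decide

set_option maxRecDepth 1000000 in
theorem mask_lt : ∀ g : Fin 8, maskN g.val < 256 := by decide

set_option maxRecDepth 100000 in
theorem alter_xor : ∀ i : Fin 256, ∀ g : Fin 8,
    alterP (i.val : Int) ((g.val : Int) + 1) = ((i.val ^^^ maskN g.val : Nat) : Int) := by decide

-- Int-level form of alter_xor
theorem alter_xorI (i k : Int) (hi0 : 0 ≤ i) (hi1 : i < 256) (hk0 : 1 ≤ k) (hk1 : k ≤ 8) :
    alterP i k = ((i.toNat ^^^ maskN (k-1).toNat : Nat) : Int) := by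
  have h := alter_xor ⟨i.toNat, by omega⟩ ⟨(k-1).toNat, by omega⟩
  simp only at h
  have h1 : ((i.toNat : Int)) = i := Int.toNat_of_nonneg hi0
  have h2 : (((k-1).toNat : Int)) + 1 = k := by omega
  rw [h1, h2] at h
  exact h

theorem xor_lt256 (a b : Nat) (ha : a < 256) (hb : b < 256) : a ^^^ b < 256 :=
  Nat.xor_lt_two_pow (n := 8) ha hb

-- ---- machinery on A's round (characterisation of the two folds) ----

theorem dget_set (dis : List Int) (t j : Int) (v : Int) (hlen : dis.length = 256)
    (ht0 : 0 ≤ t) (ht1 : t < 256) (hj0 : 0 ≤ j) :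
    dget (PySem.List.pySetD dis t v) j = if j = t then v else dget dis j := by
  obtain ⟨tN, rfl⟩ := Int.eq_ofNat_of_zero_le ht0
  obtain ⟨jN, rfl⟩ := Int.eq_ofNat_of_zero_le hj0
  unfold dget
  rw [PySem.List.pyGetD_pySetD_natCast dis tN jN v 0 (by omega)]
  simp

theorem innerA_spec (r i : Int) (hr : 0 ≤ r) (hi0 : 0 ≤ i) (hi1 : i < 256) :
    ∀ (ks : List Int) (dis : List Int) (b : Bool), dis.length = 256 →
    (∀ k ∈ ks, 1 ≤ k ∧ k ≤ 8) →
    ((ks.foldl (innerA r i) (dis, b)).1.length = 256) ∧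
    (∀ j : Int, 0 ≤ j →
      (((∃ k ∈ ks, alterP i k = j) ∧ dget dis j = -1) →
          dget (ks.foldl (innerA r i) (dis, b)).1 j = r+1) ∧
      (¬ ((∃ k ∈ ks, alterP i k = j) ∧ dget dis j = -1) →
          dget (ks.foldl (innerA r i) (dis, b)).1 j = dget dis j)) ∧
    ((ks.foldl (innerA r i) (dis, b)).2
        = (b || ks.any (fun k => dget dis (alterP i k) == -1))) := by
  intro ks
  induction ks with
  | nil =>
    intro dis b hlen _
    refine ⟨hlen, ?_, by simp⟩
    intro j _
    exact ⟨by rintro ⟨⟨k, hk, _⟩, _⟩; simp at hk, fun _ => rfl⟩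
  | cons k ks ih =>
    intro dis b hlen hb
    have hkb := hb k (by simp)
    have hksb : ∀ k' ∈ ks, 1 ≤ k' ∧ k' ≤ 8 := fun k' h => hb k' (by simp [h])
    have ht : 0 ≤ alterP i k ∧ alterP i k < 256 := by
      rw [alter_xorI i k hi0 hi1 hkb.1 hkb.2]
      have := xor_lt256 i.toNat (maskN (k-1).toNat)
        (by omega) (mask_lt ⟨(k-1).toNat, by omega⟩)
      omega
    have hdg : ∀ (ds : List Int) (j : Int), PySem.List.pyGetD ds j (0:Int) = dget ds j :=
      fun _ _ => rfl
    by_cases h : dget dis (alterP i k) = -1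
    · have hstep : (innerA r i (dis, b) k) = (PySem.List.pySetD dis (alterP i k) (r+1), true) := by
        unfold innerA
        rw [hdg, if_pos (by simp [h])]
      have hlen1 : (PySem.List.pySetD dis (alterP i k) (r+1)).length = 256 := by
        rw [PySem.List.length_pySetD]; exact hlen
      have hd1 : ∀ j : Int, 0 ≤ j →
          dget (PySem.List.pySetD dis (alterP i k) (r+1)) j
            = if j = alterP i k then r+1 else dget dis j :=
        fun j hj => dget_set dis (alterP i k) j (r+1) hlen ht.1 ht.2 hj
      obtain ⟨ih1, ih2, ih3⟩ := ih (PySem.List.pySetD dis (alterP i k) (r+1)) true hlen1 hksb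
      rw [List.foldl_cons, hstep]
      refine ⟨ih1, ?_, ?_⟩
      · intro j hj
        have hd1j := hd1 j hj
        obtain ⟨ihA, ihB⟩ := ih2 j hj
        constructor
        · rintro ⟨⟨k', hk', hak⟩, hjm⟩
          by_cases hjt : j = alterP i k
          · have : dget (PySem.List.pySetD dis (alterP i k) (r+1)) j = r+1 := by
              rw [hd1j, if_pos hjt]
            rw [ihB (by rw [this]; intro hc; omega), this]
          · have hne : dget (PySem.List.pySetD dis (alterP i k) (r+1)) j = dget dis j := by
              rw [hd1j, if_neg hjt]
            rcases List.mem_cons.mp hk' with rfl | hk'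
            · exact absurd hak.symm hjt
            · exact ihA ⟨⟨k', hk', hak⟩, by rw [hne]; exact hjm⟩
        · intro hnp
          have hjt : j ≠ alterP i k := by
            intro hjt
            exact hnp ⟨⟨k, by simp, hjt.symm⟩, by rw [hjt]; exact h⟩
          have hne : dget (PySem.List.pySetD dis (alterP i k) (r+1)) j = dget dis j := by
            rw [hd1j, if_neg hjt]
          rw [ihB (by rw [hne]; intro ⟨⟨k', hk', hak⟩, hjm⟩;
                      exact hnp ⟨⟨k', by simp [hk'], hak⟩, hjm⟩), hne]
      · rw [ih3]
        simp [h]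
    · have hstep : (innerA r i (dis, b) k) = (dis, b) := by
        unfold innerA
        rw [hdg, if_neg (by simp [h])]
      obtain ⟨ih1, ih2, ih3⟩ := ih dis b hlen hksb
      rw [List.foldl_cons, hstep]
      refine ⟨ih1, ?_, ?_⟩
      · intro j hj
        obtain ⟨ihA, ihB⟩ := ih2 j hj
        constructor
        · rintro ⟨⟨k', hk', hak⟩, hjm⟩
          rcases List.mem_cons.mp hk' with rfl | hk'
          · exact absurd (hak ▸ hjm) h
          · exact ihA ⟨⟨k', hk', hak⟩, hjm⟩
        · intro hnp
          exact ihB (by rintro ⟨⟨k', hk', hak⟩, hjm⟩;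
                        exact hnp ⟨⟨k', by simp [hk'], hak⟩, hjm⟩)
      · rw [ih3]
        simp only [List.any_cons]
        rw [show (dget dis (alterP i k) == -1) = false from by simp [h]]
        simp

theorem anyCongrMem {α : Type} (l : List α) (p q : α → Bool)
    (h : ∀ a ∈ l, p a = q a) : l.any p = l.any q := by
  induction l with
  | nil => rfl
  | cons a l ih =>
    simp only [List.any_cons, h a (by simp), ih (fun x hx => h x (by simp [hx]))]

theorem outerA_spec (r : Int) (hr : 0 ≤ r) :
    ∀ (is : List Int) (dis : List Int) (b : Bool), dis.length = 256 →
    (∀ i ∈ is, 0 ≤ i ∧ i < 256) →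
    ((is.foldl (outerA r) (dis, b)).1.length = 256) ∧
    (∀ j : Int, 0 ≤ j → j < 256 →
      ((Cnb r is dis j ∧ dget dis j = -1) →
          dget (is.foldl (outerA r) (dis, b)).1 j = r+1) ∧
      (¬ (Cnb r is dis j ∧ dget dis j = -1) →
          dget (is.foldl (outerA r) (dis, b)).1 j = dget dis j)) ∧
    ((is.foldl (outerA r) (dis, b)).2
        = (b || is.any (fun i => (dget dis i == r)
              && (PySem.List.pyRange 1 9).any (fun k => dget dis (alterP i k) == -1)))) := by
  intro is
  induction is with
  | nil =>
    intro dis b hlen _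
    refine ⟨hlen, ?_, by simp⟩
    intro j _ _
    exact ⟨by rintro ⟨⟨i, hi, _⟩, _⟩; simp at hi, fun _ => rfl⟩
  | cons i is ih =>
    intro dis b hlen hb
    have hib := hb i (by simp)
    have hisb : ∀ i' ∈ is, 0 ≤ i' ∧ i' < 256 := fun i' h => hb i' (by simp [h])
    have hdg : ∀ (ds : List Int) (j : Int), PySem.List.pyGetD ds j (0:Int) = dget ds j :=
      fun _ _ => rfl
    have hkrange : ∀ k ∈ PySem.List.pyRange 1 9, 1 ≤ k ∧ k ≤ 8 := by
      intro k hk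
      have := PySem.List.mem_pyRange_one.mp hk
      omega
    have halt : ∀ (i' k : Int), 0 ≤ i' → i' < 256 → 1 ≤ k → k ≤ 8 →
        0 ≤ alterP i' k ∧ alterP i' k < 256 := by
      intro i' k h0 h1 h2 h3
      rw [alter_xorI i' k h0 h1 h2 h3]
      have := xor_lt256 i'.toNat (maskN (k-1).toNat)
        (by omega) (mask_lt ⟨(k-1).toNat, by omega⟩)
      omega
    by_cases hf : dget dis i = r
    · have hstep : outerA r (dis, b) i = (PySem.List.pyRange 1 9).foldl (innerA r i) (dis, b) := by
        unfold outerA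
        rw [hdg, if_pos (by simp [hf])]
      set st := (PySem.List.pyRange 1 9).foldl (innerA r i) (dis, b) with hst
      obtain ⟨hlen1, hchar, hflag⟩ :=
        innerA_spec r i hr hib.1 hib.2 (PySem.List.pyRange 1 9) dis b hlen hkrange
      obtain ⟨ih1, ih2, ih3⟩ := ih st.1 st.2 hlen1 hisb
      have hfold : (i :: is).foldl (outerA r) (dis, b) = is.foldl (outerA r) (st.1, st.2) := by
        rw [List.foldl_cons, hstep]
      -- frontier test is stable under the writes of this round
      have hpres : ∀ x : Int, 0 ≤ x → (dget st.1 x = r ↔ dget dis x = r) := by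
        intro x hx
        obtain ⟨hA, hB⟩ := hchar x hx
        by_cases hp : (∃ k ∈ PySem.List.pyRange 1 9, alterP i k = x) ∧ dget dis x = -1
        · rw [hA hp]
          constructor
          · intro hc; omega
          · intro hc; rw [hc] at hp; omega
        · rw [hB hp]
      have hCnb : ∀ j : Int, Cnb r is st.1 j ↔ Cnb r is dis j := by
        intro j
        constructor
        · rintro ⟨i', hi', hd, hk⟩
          exact ⟨i', hi', (hpres i' (hisb i' hi').1).mp hd, hk⟩
        · rintro ⟨i', hi', hd, hk⟩
          exact ⟨i', hi', (hpres i' (hisb i' hi').1).mpr hd, hk⟩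
      refine ⟨by rw [hfold]; exact ih1, ?_, ?_⟩
      · intro j hj0 hj1
        rw [hfold]
        obtain ⟨hjA, hjB⟩ := hchar j hj0
        obtain ⟨ihA, ihB⟩ := ih2 j hj0 hj1
        constructor
        · rintro ⟨⟨i', hi'm, hd, k', hk', hak⟩, hjm⟩
          by_cases hW : ∃ k ∈ PySem.List.pyRange 1 9, alterP i k = j
          · have hv : dget st.1 j = r + 1 := hjA ⟨hW, hjm⟩
            rw [ihB (by rw [hv]; rintro ⟨_, hc⟩; omega), hv]
          · have hv : dget st.1 j = dget dis j := hjB (by rintro ⟨hW', _⟩; exact hW hW')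
            rcases List.mem_cons.mp hi'm with rfl | hi'm
            · exact absurd ⟨k', hk', hak⟩ hW
            · exact ihA ⟨(hCnb j).mpr ⟨i', hi'm, hd, k', hk', hak⟩, by rw [hv]; exact hjm⟩
        · intro hnp
          rw [hfold] at *
          by_cases hjm : dget dis j = -1
          · have hW : ¬ ∃ k ∈ PySem.List.pyRange 1 9, alterP i k = j := by
              rintro ⟨k', hk', hak⟩
              exact hnp ⟨⟨i, by simp, hf, k', hk', hak⟩, hjm⟩
            have hv : dget st.1 j = dget dis j := hjB (by rintro ⟨hW', _⟩; exact hW hW')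
            have hnc : ¬ (Cnb r is st.1 j ∧ dget st.1 j = -1) := by
              rintro ⟨hc, _⟩
              rcases (hCnb j).mp hc with ⟨i', hi', hd, hk⟩
              exact hnp ⟨⟨i', by simp [hi'], hd, hk⟩, hjm⟩
            rw [ihB hnc, hv]
          · have hv : dget st.1 j = dget dis j := hjB (by rintro ⟨_, hc⟩; exact hjm hc)
            rw [ihB (by rintro ⟨_, hc⟩; rw [hv] at hc; exact hjm hc), hv]
      · rw [hfold, ih3, hflag]
        simp only [List.any_cons]
        rw [show (dget dis i == r) = true from by simp [hf]]
        simp only [Bool.true_and]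
        by_cases hany : (PySem.List.pyRange 1 9).any (fun k => dget dis (alterP i k) == -1) = true
        · simp [hany]
        · have hnowrite : ∀ x : Int, 0 ≤ x → dget st.1 x = dget dis x := by
            intro x hx
            refine (hchar x hx).2 ?_
            rintro ⟨⟨k', hk', hak⟩, hxm⟩
            refine hany ?_
            refine List.any_eq_true.mpr ⟨k', hk', by simp [hak, hxm]⟩
          have hcong : is.any (fun i' => (dget st.1 i' == r)
                && (PySem.List.pyRange 1 9).any (fun k => dget st.1 (alterP i' k) == -1))
              = is.any (fun i' => (dget dis i' == r)
                && (PySem.List.pyRange 1 9).any (fun k => dget dis (alterP i' k) == -1)) := by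
            refine anyCongrMem _ _ _ ?_
            intro i' hi'
            have h1 := hnowrite i' (hisb i' hi').1
            have h2 : (PySem.List.pyRange 1 9).any (fun k => dget st.1 (alterP i' k) == -1)
                = (PySem.List.pyRange 1 9).any (fun k => dget dis (alterP i' k) == -1) := by
              refine anyCongrMem _ _ _ ?_
              intro k' hk'
              have hkb := hkrange k' hk'
              have := halt i' k' (hisb i' hi').1 (hisb i' hi').2 hkb.1 hkb.2
              rw [hnowrite (alterP i' k') this.1]
            rw [h1, h2]
          rw [hcong]
          simp [hany]
    · have hstep : outerA r (dis, b) i = (dis, b) := by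
        unfold outerA
        rw [hdg, if_neg (by simp [hf])]
      obtain ⟨ih1, ih2, ih3⟩ := ih dis b hlen hisb
      rw [List.foldl_cons, hstep]
      refine ⟨ih1, ?_, ?_⟩
      · intro j hj0 hj1
        obtain ⟨ihA, ihB⟩ := ih2 j hj0 hj1
        constructor
        · rintro ⟨⟨i', hi'm, hd, hk⟩, hjm⟩
          rcases List.mem_cons.mp hi'm with rfl | hi'm
          · exact absurd hd hf
          · exact ihA ⟨⟨i', hi'm, hd, hk⟩, hjm⟩
        · intro hnp
          refine ihB ?_
          rintro ⟨⟨i', hi'm, hd, hk⟩, hjm⟩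
          exact hnp ⟨⟨i', by simp [hi'm], hd, hk⟩, hjm⟩
      · rw [ih3]
        simp only [List.any_cons]
        rw [show (dget dis i == r) = false from by simp [hf]]
        simp

-- ---- from the round characterisation to the table ----

theorem WtI_nonneg (s j : Int) : 0 ≤ WtI s j := Int.natCast_nonneg _

theorem dget_frontier (s r : Int) (dis : List Int) (hr : 0 ≤ r)
    (hInv : InvT s r dis) (j : Int) (hj0 : 0 ≤ j) (hj1 : j < 256) :
    (dget dis j = r ↔ WtI s j = r) ∧ (dget dis j = -1 ↔ r < WtI s j) := by
  obtain ⟨-, h⟩ := hInv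
  have hw := WtI_nonneg s j
  rw [h j hj0 hj1]
  constructor
  · split_ifs with hle
    · constructor <;> (intro; omega)
    · constructor <;> (intro; omega)
  · split_ifs with hle
    · constructor <;> (intro; omega)
    · constructor <;> (intro; omega)

-- the neighbourhood condition, in terms of the table
theorem Cnb_iff (s r : Int) (dis : List Int) (_hs0 : 0 ≤ s) (_hs1 : s < 256)
    (hr : 0 ≤ r) (hInv : InvT s r dis) (j : Int) (hj0 : 0 ≤ j) (hj1 : j < 256) :
    Cnb r (PySem.List.pyRange 0 256) dis j ↔
      ∃ g : Fin 8, Tf ((s.toNat ^^^ j.toNat) ^^^ maskN g.val) = r.toNat := by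
  have hfr := fun i hi0 hi1 => (dget_frontier s r dis hr hInv i hi0 hi1).1
  constructor
  · rintro ⟨i, hi, hd, k, hk, hak⟩
    have hib : 0 ≤ i ∧ i < 256 := by
      have := PySem.List.mem_pyRange_one.mp hi; omega
    have hkb : 1 ≤ k ∧ k ≤ 8 := by
      have := PySem.List.mem_pyRange_one.mp hk; omega
    have hx := alter_xorI i k hib.1 hib.2 hkb.1 hkb.2
    rw [hx] at hak
    have hiN : i.toNat = j.toNat ^^^ maskN (k-1).toNat := by
      have hjN : j.toNat = i.toNat ^^^ maskN (k-1).toNat := by omega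
      rw [hjN, Nat.xor_xor_cancel_right]
    have hWi : (Tf (s.toNat ^^^ i.toNat) : Int) = r := (hfr i hib.1 hib.2).mp hd
    refine ⟨⟨(k-1).toNat, by omega⟩, ?_⟩
    show Tf ((s.toNat ^^^ j.toNat) ^^^ maskN (k-1).toNat) = r.toNat
    rw [Nat.xor_assoc, ← hiN]
    omega
  · rintro ⟨g, hg⟩
    have hjm : j.toNat ^^^ maskN g.val < 256 := xor_lt256 _ _ (by omega) (mask_lt g)
    set i : Int := ((j.toNat ^^^ maskN g.val : Nat) : Int) with hi
    have hib : 0 ≤ i ∧ i < 256 := by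
      constructor
      · exact Int.natCast_nonneg _
      · rw [hi]; omega
    have hiN : i.toNat = j.toNat ^^^ maskN g.val := by rw [hi]; omega
    refine ⟨i, PySem.List.mem_pyRange_one.mpr (by omega), ?_, (g.val : Int) + 1,
      PySem.List.mem_pyRange_one.mpr (by omega), ?_⟩
    · refine (hfr i hib.1 hib.2).mpr ?_
      show (Tf (s.toNat ^^^ i.toNat) : Int) = r
      rw [hiN, ← Nat.xor_assoc]
      omega
    · have hx := alter_xorI i ((g.val : Int) + 1) hib.1 hib.2 (by omega) (by omega)
      have hg1 : (((g.val : Int) + 1) - 1).toNat = g.val := by omega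
      rw [hg1] at hx
      rw [hx, hiN, Nat.xor_xor_cancel_right]
      omega

-- one round of A preserves the invariant and its flag detects the next layer
theorem round_step (s r : Int) (dis : List Int) (hs0 : 0 ≤ s) (hs1 : s < 256)
    (hr0 : 0 ≤ r) (hr9 : r ≤ 9) (hInv : InvT s r dis) :
    InvT s (r+1) ((PySem.List.pyRange 0 256).foldl (outerA r) (dis, false)).1 ∧
    ((((PySem.List.pyRange 0 256).foldl (outerA r) (dis, false)).2 = true) ↔
      ∃ y : Fin 256, Tf y.val = r.toNat + 1) := by
  have hrange : ∀ i ∈ PySem.List.pyRange 0 256, 0 ≤ i ∧ i < 256 := by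
    intro i hi; have := PySem.List.mem_pyRange_one.mp hi; omega
  have hkrange : ∀ k ∈ PySem.List.pyRange 1 9, 1 ≤ k ∧ k ≤ 8 := by
    intro k hk; have := PySem.List.mem_pyRange_one.mp hk; omega
  obtain ⟨hlen, hd⟩ := hInv
  obtain ⟨slen, schar, sflag⟩ := outerA_spec r hr0 (PySem.List.pyRange 0 256) dis false hlen hrange
  have hrF : r.toNat < 10 := by omega
  have hrI : ((r.toNat : Int)) = r := Int.toNat_of_nonneg hr0
  constructor
  · refine ⟨slen, ?_⟩
    intro j hj0 hj1
    have hyb : s.toNat ^^^ j.toNat < 256 := xor_lt256 _ _ (by omega) (by omega)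
    have hW := WtI_nonneg s j
    have hWT : WtI s j = (Tf (s.toNat ^^^ j.toNat) : Int) := rfl
    have hstep : r.toNat < Tf (s.toNat ^^^ j.toNat) →
        ((Tf (s.toNat ^^^ j.toNat) = r.toNat + 1) ↔
          ∃ g : Fin 8, Tf ((s.toNat ^^^ j.toNat) ^^^ maskN g.val) = r.toNat) :=
      T_step ⟨s.toNat ^^^ j.toNat, hyb⟩ ⟨r.toNat, hrF⟩
    obtain ⟨sA, sB⟩ := schar j hj0 hj1
    have hfr := dget_frontier s r dis hr0 ⟨hlen, hd⟩ j hj0 hj1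
    by_cases hle : WtI s j ≤ r
    · -- already labelled: unchanged
      have hnm : dget dis j ≠ -1 := by
        intro hc
        have := hfr.2.mp hc
        omega
      rw [sB (by rintro ⟨-, hc⟩; exact hnm hc), hd j hj0 hj1,
        if_pos hle, if_pos (by omega)]
    · -- unlabelled: set to r+1 exactly when the table says the distance is r+1
      have hm1 : dget dis j = -1 := hfr.2.mpr (by omega)
      by_cases heq : WtI s j = r + 1
      · have hTeq : Tf (s.toNat ^^^ j.toNat) = r.toNat + 1 := by omega
        have hex := (hstep (by omega)).mp hTeq
        have hcnb := (Cnb_iff s r dis hs0 hs1 hr0 ⟨hlen, hd⟩ j hj0 hj1).mpr hex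
        rw [sA ⟨hcnb, hm1⟩, if_pos (by omega), heq]
      · have hnc : ¬ Cnb r (PySem.List.pyRange 0 256) dis j := by
          intro hcnb
          obtain ⟨g, hg⟩ := (Cnb_iff s r dis hs0 hs1 hr0 ⟨hlen, hd⟩ j hj0 hj1).mp hcnb
          have := (hstep (by omega)).mpr ⟨g, hg⟩
          omega
        rw [sB (by rintro ⟨hc, -⟩; exact hnc hc), hm1, if_neg (by omega)]
  · rw [sflag]
    simp only [Bool.false_or, List.any_eq_true, Bool.and_eq_true, beq_iff_eq]
    have hfr := fun i hi0 hi1 => dget_frontier s r dis hr0 ⟨hlen, hd⟩ i hi0 hi1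
    have hflag : (∃ y : Fin 256, Tf y.val = r.toNat ∧
        ∃ g : Fin 8, r.toNat < Tf (y.val ^^^ maskN g.val)) ↔
        (∃ y : Fin 256, Tf y.val = r.toNat + 1) := T_flag ⟨r.toNat, hrF⟩
    rw [← hflag]
    constructor
    · rintro ⟨i, hi, hdi, k, hk, hkm⟩
      have hib := hrange i hi
      have hkb := hkrange k hk
      have hx := alter_xorI i k hib.1 hib.2 hkb.1 hkb.2
      have hmb : maskN (k-1).toNat < 256 := mask_lt ⟨(k-1).toNat, by omega⟩
      have htb : 0 ≤ alterP i k ∧ alterP i k < 256 := by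
        rw [hx]
        have := xor_lt256 i.toNat (maskN (k-1).toNat) (by omega) hmb
        omega
      have haN : (alterP i k).toNat = i.toNat ^^^ maskN (k-1).toNat := by omega
      have hdm : dget dis (alterP i k) = -1 := hkm
      have hgt : r < (Tf (s.toNat ^^^ (alterP i k).toNat) : Int) := (hfr _ htb.1 htb.2).2.mp hdm
      have hWi : (Tf (s.toNat ^^^ i.toNat) : Int) = r := (hfr i hib.1 hib.2).1.mp hdi
      have hyb2 : s.toNat ^^^ i.toNat < 256 := xor_lt256 _ _ (by omega) (by omega)
      have hgt2 : r < (Tf ((s.toNat ^^^ i.toNat) ^^^ maskN (k-1).toNat) : Int) := by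
        rw [Nat.xor_assoc, ← haN]
        exact hgt
      refine ⟨⟨s.toNat ^^^ i.toNat, hyb2⟩, by show Tf (s.toNat ^^^ i.toNat) = r.toNat; omega,
        ⟨(k-1).toNat, by omega⟩, ?_⟩
      show r.toNat < Tf ((s.toNat ^^^ i.toNat) ^^^ maskN (k-1).toNat)
      omega
    · rintro ⟨y, hy, g, hg⟩
      have hyv : Tf y.val = r.toNat := hy
      have hgv : r.toNat < Tf (y.val ^^^ maskN g.val) := hg
      have hsx : s.toNat ^^^ y.val < 256 := xor_lt256 _ _ (by omega) y.isLt
      set i : Int := ((s.toNat ^^^ y.val : Nat) : Int) with hi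
      have hib : 0 ≤ i ∧ i < 256 := by
        constructor
        · exact Int.natCast_nonneg _
        · rw [hi]; omega
      have hiN : i.toNat = s.toNat ^^^ y.val := by rw [hi]; omega
      have hyi : s.toNat ^^^ i.toNat = y.val := by
        rw [hiN, Nat.xor_xor_cancel_left]
      have hdi : dget dis i = r := by
        refine (hfr i hib.1 hib.2).1.mpr ?_
        show (Tf (s.toNat ^^^ i.toNat) : Int) = r
        rw [hyi]
        omega
      refine ⟨i, PySem.List.mem_pyRange_one.mpr (by omega), hdi, (g.val : Int) + 1,
        PySem.List.mem_pyRange_one.mpr (by omega), ?_⟩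
      have hx := alter_xorI i ((g.val : Int) + 1) hib.1 hib.2 (by omega) (by omega)
      have hg1 : (((g.val : Int) + 1) - 1).toNat = g.val := by omega
      rw [hg1] at hx
      have hmb : maskN g.val < 256 := mask_lt g
      have htb : 0 ≤ alterP i ((g.val : Int) + 1) ∧ alterP i ((g.val : Int) + 1) < 256 := by
        rw [hx]
        have := xor_lt256 i.toNat (maskN g.val) (by omega) hmb
        omega
      have haN : (alterP i ((g.val : Int) + 1)).toNat = (s.toNat ^^^ y.val) ^^^ maskN g.val := by
        rw [← hiN]; omega
      have hdm : dget dis (alterP i ((g.val : Int) + 1)) = -1 := by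
        refine (hfr _ htb.1 htb.2).2.mpr ?_
        show r < (Tf (s.toNat ^^^ (alterP i ((g.val : Int) + 1)).toNat) : Int)
        rw [haN, ← Nat.xor_assoc, Nat.xor_xor_cancel_left]
        omega
      exact hdm

theorem loopA_succ (f : Nat) (dis : List Int) (r : Int) :
    loopA (f+1) dis r =
      (if ((PySem.List.pyRange 0 256).foldl (outerA r) (dis, false)).2 = false then -1
       else if PySem.List.pyGetD ((PySem.List.pyRange 0 256).foldl (outerA r) (dis, false)).1 255 0 > 0
         then PySem.List.pyGetD ((PySem.List.pyRange 0 256).foldl (outerA r) (dis, false)).1 255 0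
       else loopA f ((PySem.List.pyRange 0 256).foldl (outerA r) (dis, false)).1 (r+1)) := rfl

-- the main loop computes the table entry for 255 (or -1 when it is 0 or 99)
theorem loop_main : ∀ (fuel : Nat) (r : Int) (dis : List Int) (s : Int),
    0 ≤ s → s < 256 → 0 ≤ r → r ≤ 9 → (11:Int) ≤ (fuel:Int) + r → InvT s r dis →
    (WtI s 255 = 0 ∨ r < WtI s 255) →
    loopA fuel dis r = if WtI s 255 = 0 ∨ WtI s 255 = 99 then -1 else WtI s 255 := by
  intro fuel
  induction fuel with
  | zero =>
    intro r dis s _ _ _ hr9 hf _ _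
    norm_num at hf
    omega
  | succ f ih =>
    intro r dis s hs0 hs1 hr0 hr9 hf hInv hH
    obtain ⟨hInv', hflag⟩ := round_step s r dis hs0 hs1 hr0 hr9 hInv
    rw [loopA_succ]
    set st := (PySem.List.pyRange 0 256).foldl (outerA r) (dis, false) with hst
    have hW255 : dget st.1 255 = if WtI s 255 ≤ r + 1 then WtI s 255 else -1 :=
      hInv'.2 255 (by omega) (by omega)
    have hWn : 0 ≤ WtI s 255 := WtI_nonneg s 255
    have hyb : s.toNat ^^^ (255:Int).toNat < 256 := xor_lt256 _ _ (by omega) (by norm_num)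
    have hWT : WtI s 255 = (Tf (s.toNat ^^^ (255:Int).toNat) : Int) := rfl
    have hWb : Tf (s.toNat ^^^ (255:Int).toNat) ≤ 8 ∨ Tf (s.toNat ^^^ (255:Int).toNat) = 99 :=
      T_bound ⟨s.toNat ^^^ (255:Int).toNat, hyb⟩
    by_cases hnew : st.2 = true
    · rw [if_neg (by simp [hnew])]
      have hr8 : r ≤ 8 := by
        by_contra hgt
        obtain ⟨y, hy⟩ := hflag.mp hnew
        have hb := T_bound y
        have hy' : Tf y.val = r.toNat + 1 := hy
        omega
      have hdg : PySem.List.pyGetD st.1 255 0 = dget st.1 255 := rfl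
      rw [hdg, hW255]
      rcases hH with hw0 | hlt
      · have hc1 : WtI s 255 ≤ r + 1 := by omega
        rw [if_pos hc1, hw0]
        rw [if_neg (show ¬((0:Int) > 0) by norm_num)]
        rw [if_pos (show (0:Int) = 0 ∨ (0:Int) = 99 from Or.inl rfl)]
        have hrec := ih (r+1) st.1 s hs0 hs1 (by omega) (by omega)
          (by push_cast at hf ⊢; omega) hInv' (Or.inl hw0)
        rw [hrec, if_pos (Or.inl hw0)]
      · by_cases hcmp : WtI s 255 ≤ r + 1
        · have hWr : WtI s 255 = r + 1 := by omega
          rw [if_pos hcmp]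
          rw [if_pos (show WtI s 255 > 0 by omega)]
          rw [if_neg (show ¬(WtI s 255 = 0 ∨ WtI s 255 = 99) by omega)]
        · rw [if_neg hcmp]
          rw [if_neg (show ¬((-1:Int) > 0) by norm_num)]
          exact ih (r+1) st.1 s hs0 hs1 (by omega) (by omega)
            (by push_cast at hf ⊢; omega) hInv' (Or.inr (by omega))
    · rw [if_pos (by simpa using hnew)]
      have hrI : ((r.toNat : Int)) = r := Int.toNat_of_nonneg hr0
      have hnex : ¬ ∃ y : Fin 256, Tf y.val = r.toNat + 1 := fun hex => hnew (hflag.mpr hex)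
      have hsat : ∀ y : Fin 256, Tf y.val ≤ r.toNat ∨ Tf y.val = 99 :=
        T_sat ⟨r.toNat, by omega⟩ hnex
      have hy255 : Tf (s.toNat ^^^ (255:Int).toNat) ≤ r.toNat ∨
          Tf (s.toNat ^^^ (255:Int).toNat) = 99 := hsat ⟨s.toNat ^^^ (255:Int).toNat, hyb⟩
      rw [if_pos (show WtI s 255 = 0 ∨ WtI s 255 = 99 by omega)]

-- ---- initialisation and the wrap of a negative start index ----

set_option maxRecDepth 20000 in
theorem base_replicate :
    (PySem.List.pyRange 0 256).map (fun _ => (-1:Int)) = List.replicate 256 (-1) := by decide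

theorem dget_base (j : Int) (hj0 : 0 ≤ j) (hj1 : j < 256) :
    dget ((PySem.List.pyRange 0 256).map (fun _ => (-1:Int))) j = -1 := by
  rw [base_replicate]
  unfold dget
  rw [PySem.List.pyGetD_of_nonneg _ _ hj0]
  rw [List.getD_eq_getElem?_getD, List.getElem?_replicate, if_pos (by omega)]
  rfl

theorem setD_wrap (n : Int) (hn : -256 ≤ n) (hn' : n < 256) :
    PySem.List.pySetD ((PySem.List.pyRange 0 256).map (fun _ => (-1:Int))) n 0
      = PySem.List.pySetD ((PySem.List.pyRange 0 256).map (fun _ => (-1:Int)))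
          (PySem.Int.mod n 256) 0 := by
  set base := (PySem.List.pyRange 0 256).map (fun _ => (-1:Int)) with hbase
  have hlenb : base.length = 256 := by rw [hbase, base_replicate, List.length_replicate]
  have hs : PySem.Int.mod n 256 = n % 256 := PySem.Int.mod_eq_emod_of_pos (by omega)
  set s := PySem.Int.mod n 256 with hsdef
  have hs0 : 0 ≤ s := PySem.Int.mod_nonneg n (by omega)
  have hs1 : s < 256 := PySem.Int.mod_lt n (by omega)
  unfold PySem.List.pySetD PySem.List.pySet? PySem.List.pyIdx?
  rw [hlenb]
  by_cases hpos : 0 ≤ n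
  · have hsn : s = n := by omega
    rw [hsn]
  · rw [if_neg hpos, if_pos (by push_cast; omega), if_pos hs0, if_pos (by push_cast; omega)]
    have : (256 : Nat) - (-n).toNat = s.toNat := by omega
    rw [this]

theorem init_InvT (s : Int) (hs0 : 0 ≤ s) (hs1 : s < 256) :
    InvT s 0 (PySem.List.pySetD ((PySem.List.pyRange 0 256).map (fun _ => (-1:Int))) s 0) := by
  set base := (PySem.List.pyRange 0 256).map (fun _ => (-1:Int)) with hbase
  have hlenb : base.length = 256 := by rw [hbase, base_replicate, List.length_replicate]
  refine ⟨by rw [PySem.List.length_pySetD]; exact hlenb, ?_⟩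
  intro j hj0 hj1
  rw [dget_set base s j 0 hlenb hs0 hs1 hj0]
  have hyb : s.toNat ^^^ j.toNat < 256 := xor_lt256 _ _ (by omega) (by omega)
  have hz : Tf (s.toNat ^^^ j.toNat) = 0 ↔ s.toNat ^^^ j.toNat = 0 :=
    T_zero ⟨s.toNat ^^^ j.toNat, hyb⟩
  have hW : WtI s j = (Tf (s.toNat ^^^ j.toNat) : Int) := rfl
  have hWn := WtI_nonneg s j
  by_cases hjs : j = s
  · have h0 : s.toNat ^^^ j.toNat = 0 := by rw [hjs, Nat.xor_self]
    have hW0 : WtI s j = 0 := by rw [hW, hz.mpr h0]; rfl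
    rw [if_pos hjs, hW0, if_pos (le_refl (0:Int))]
  · have hne : s.toNat ^^^ j.toNat ≠ 0 := fun hc =>
      hjs (by have := Nat.xor_eq_zero_iff.mp hc; omega)
    have hWpos : ¬ WtI s j ≤ 0 := by
      have hTne : Tf (s.toNat ^^^ j.toNat) ≠ 0 := fun hc => hne (hz.mp hc)
      omega
    rw [if_neg hjs, if_neg hWpos]
    exact dget_base j hj0 hj1

-- ---- characterisations of the two programs ----

theorem A_char (n : Int) (hn : Pre_LeastStep n) :
    LeastStep n = if WtI (PySem.Int.mod n 256) 255 = 0 ∨ WtI (PySem.Int.mod n 256) 255 = 99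
      then -1 else WtI (PySem.Int.mod n 256) 255 := by
  obtain ⟨hn0, hn1⟩ := hn
  set s := PySem.Int.mod n 256 with hsdef
  have hs0 : 0 ≤ s := PySem.Int.mod_nonneg n (by omega)
  have hs1 : s < 256 := PySem.Int.mod_lt n (by omega)
  show loopA 300 (PySem.List.pySetD ((PySem.List.pyRange 0 256).map (fun _ => (-1:Int))) n 0) 0 = _
  rw [setD_wrap n hn0 hn1]
  refine loop_main 300 0 _ s hs0 hs1 (by omega) (by omega) (by norm_num)
    (init_InvT s hs0 hs1) ?_
  have := WtI_nonneg s 255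
  omega

set_option maxRecDepth 100000 in
theorem B_tab : ∀ s : Fin 256, LeastStep_alt (s.val : Int)
    = (if Tf (s.val ^^^ 255) = 99 then -1 else (Tf (s.val ^^^ 255) : Int)) := by decide

theorem mod_idem (n : Int) : PySem.Int.mod (PySem.Int.mod n 256) 256 = PySem.Int.mod n 256 := by
  rw [PySem.Int.mod_eq_emod_of_pos (by omega), PySem.Int.mod_eq_emod_of_pos (by omega)]
  exact Int.emod_emod_of_dvd n (dvd_refl _)

theorem B_char (n : Int) :
    LeastStep_alt n = if WtI (PySem.Int.mod n 256) 255 = 99 then -1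
      else WtI (PySem.Int.mod n 256) 255 := by
  set s := PySem.Int.mod n 256 with hsdef
  have hs0 : 0 ≤ s := PySem.Int.mod_nonneg n (by omega)
  have hs1 : s < 256 := PySem.Int.mod_lt n (by omega)
  have h1 : LeastStep_alt n = LeastStep_alt s := by
    show [(0:Int), 1].foldl (tryFirstB (PySem.Int.mod n 256)) (-1)
        = [(0:Int), 1].foldl (tryFirstB (PySem.Int.mod s 256)) (-1)
    rw [hsdef, mod_idem]
  have h2 := B_tab ⟨s.toNat, by omega⟩
  simp only at h2
  have hsc : ((s.toNat : Int)) = s := Int.toNat_of_nonneg hs0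
  rw [hsc] at h2
  have hW : WtI s 255 = (Tf (s.toNat ^^^ 255) : Int) := rfl
  rw [h1, h2, hW]
  split_ifs with hA hB hB
  · rfl
  · omega
  · omega
  · rfl

-- ===== VERDICT (by name: the statement is the Claim_ definition above) =====

theorem LeastStep_spec : Claim_unchanged_LeastStep := by
  intro n _ hn hD
  show LeastStep n = LeastStep_alt n
  rw [A_char n hn, B_char n]
  have hs0 : 0 ≤ PySem.Int.mod n 256 := PySem.Int.mod_nonneg n (by omega)
  have hs1 : PySem.Int.mod n 256 < 256 := PySem.Int.mod_lt n (by omega)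
  have hWne : WtI (PySem.Int.mod n 256) 255 ≠ 0 := by
    intro hc
    apply hD
    unfold D_LeastStep
    set s := PySem.Int.mod n 256
    have hyb : s.toNat ^^^ (255:Int).toNat < 256 := xor_lt256 _ _ (by omega) (by norm_num)
    have hz : Tf (s.toNat ^^^ (255:Int).toNat) = 0 ↔ s.toNat ^^^ (255:Int).toNat = 0 :=
      T_zero ⟨s.toNat ^^^ (255:Int).toNat, hyb⟩
    have hT0 : Tf (s.toNat ^^^ (255:Int).toNat) = 0 := by
      unfold WtI at hc
      omega
    have hx := Nat.xor_eq_zero_iff.mp (hz.mp hT0)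
    have h255 : ((255:Int)).toNat = 255 := rfl
    rw [h255] at hx
    omega
  split_ifs with hA hB hB
  · rfl
  · omega
  · omega
  · rfl

theorem LeastStep_changed : Claim_changed_LeastStep := by
  unfold Claim_changed_LeastStep
  refine ⟨by decide, by decide, by decide, ?_, ?_, by decide⟩
  · show LeastStep (255:Int) = (-1:Int)
    have h := A_char 255 ⟨by norm_num, by norm_num⟩
    have hm : PySem.Int.mod (255:Int) 256 = 255 := by decide
    rw [hm] at h
    have hW : WtI (255:Int) 255 = 0 := by decide
    rw [h, hW]
    norm_num
  · show LeastStep_alt (255:Int) = (0:Int)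
    have h := B_char 255
    have hm : PySem.Int.mod (255:Int) 256 = 255 := by decide
    rw [hm] at h
    have hW : WtI (255:Int) 255 = 0 := by decide
    rw [h, hW]
    norm_num

theorem LeastStep_tight : Claim_exact_LeastStep := by
  intro n _ hn hD
  have hA := A_char n hn
  have hB := B_char n
  have hW : WtI (PySem.Int.mod n 256) 255 = 0 := by
    unfold D_LeastStep at hD
    rw [hD]
    decide
  rw [hA, hB, hW]
  norm_num
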